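/- GENERATED by c/gen_decode.py: decode facts of the image, one per distinct instruction byte string. -/
import UserX.DecodeImage

#decode_all Vorbis.Dec
  "09f8"  -- or eax,edi
  "0f8436010000"  -- je 113bee
  "0f84e4000000"  -- je 107843
  "0f8800010000"  -- js 104208
  "0f8ecbfeffff"  -- jle 10f6f0
  "0fb68334060000"  -- movzx eax,BYTE PTR [rbx+0x634]
  "394c240c"  -- cmp DWORD PTR [rsp+0xc],ecx
  "410fafc7"  -- imul eax,r15d
  "4139dc"  -- cmp r12d,ebx
  "41880424"  -- mov BYTE PTR [r12],al
  "418b2c9f"  -- mov ebp,DWORD PTR [r15+rbx*4]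
  "41c6461902"  -- mov BYTE PTR [r14+0x19],0x2
  "428d6c301b"  -- lea ebp,[rax+r14*1+0x1b]
  "4439a3a0000000"  -- cmp DWORD PTR [rbx+0xa0],r12d
  "44896c2414"  -- mov DWORD PTR [rsp+0x14],r13d
  "4489ea"  -- mov edx,r13d
  "448b8548ffffff"  -- mov r8d,DWORD PTR [rbp-0xb8]
  "450fbfec"  -- movsx r13d,r12w
  "4589fc"  -- mov r12d,r15d
  "4801c5"  -- add rbp,rax
  "48635c240c"  -- movsxd rbx,DWORD PTR [rsp+0xc]
  "4881ecc8070000"  -- sub rsp,0x7c8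
  "4889042568f01f00"  -- mov QWORD PTR ds:0x1ff068,rax
  "4889cf"  -- mov rdi,rcx
  "488b6c2418"  -- mov rbp,QWORD PTR [rsp+0x18]
  "488d1c06"  -- lea rbx,[rsi+rax*1]
  "488d7b0d"  -- lea rdi,[rbx+0xd]
  "488d7f1b"  -- lea rdi,[rdi+0x1b]
  "488dbbe0060000"  -- lea rdi,[rbx+0x6e0]
  "488dbfdc060000"  -- lea rdi,[rdi+0x6dc]
  "48c783f000c00000000000"  -- mov QWORD PTR [rbx+0xc000f0],0x0
  "4963d4"  -- movsxd rdx,r12d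
  "4989f4"  -- mov r12,rsi
  "498d7c24fc"  -- lea rdi,[r12-0x4]
  "498dbef8060000"  -- lea rdi,[r14+0x6f8]
  "4a8dbc3346030000"  -- lea rdi,[rbx+r14*1+0x346]
  "4c39f3"  -- cmp rbx,r14
  "4c89e0"  -- mov rax,r12
  "4c8bad50ffffff"  -- mov r13,QWORD PTR [rbp-0xb0]
  "4c8db42480020000"  -- lea r14,[rsp+0x280]
  "4d8d3484"  -- lea r14,[r12+rax*4]
  "660f28f0"  -- movapd xmm6,xmm0
  "66410f6ef5"  -- movd xmm6,r13d
  "6685db"  -- test bx,bx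
  "7425"  -- je 109166
  "7512"  -- jne 1149e1
  "77d6"  -- ja 104575
  "7e1c"  -- jle 115cf9
  "7fec"  -- jg 100cc6
  "83bbe8060000ff"  -- cmp DWORD PTR [rbx+0x6e8],0xffffffff
  "8883d4060000"  -- mov BYTE PTR [rbx+0x6d4],al
  "897c240c"  -- mov DWORD PTR [rsp+0xc],edi
  "89f5"  -- mov ebp,esi
  "8b5c2478"  -- mov ebx,DWORD PTR [rsp+0x78]
  "8b9598000000"  -- mov edx,DWORD PTR [rbp+0x98]
  "b9a04b1000"  -- mov ecx,0x104ba0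
  "c1f902"  -- sar ecx,0x2
  "c782e806000000000000"  -- mov DWORD PTR [rdx+0x6e8],0x0
  "e800affeff"  -- call 1003c0
  "e80a8fffff"  -- call 100800
  "e814ecfeff"  -- call 100720
  "e81d67ffff"  -- call 100720
  "e82895ffff"  -- call 100640
  "e83069ffff"  -- call 103f80
  "e83ad4feff"  -- call 100640
  "e846affeff"  -- call 100560
  "e8509cffff"  -- call 100640
  "e85b71ffff"  -- call 102ca0
  "e869defeff"  -- call 104100
  "e87550ffff"  -- call 108f20
  "e87f8effff"  -- call 10d1c0
  "e88aedfeff"  -- call 100720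
  "e894abfeff"  -- call 1008e0
  "e89edffeff"  -- call 103d00
  "e8a939ffff"  -- call 100640
  "e8b2c3ffff"  -- call 100720
  "e8bcfeffff"  -- call 106f60
  "e8c849ffff"  -- call 108dc0
  "e8d0c3feff"  -- call 100640
  "e8db36ffff"  -- call 100640
  "e8e517ffff"  -- call 1008e0
  "e8ed5cffff"  -- call 1015e0
  "e8f7fcfeff"  -- call 103d00
  "e90ed6ffff"  -- jmp 113b22
  "e955dfffff"  -- jmp 113b22
  "e9a5fbffff"  -- jmp 114724
  "e9f7e7ffff"  -- jmp 113b22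
  "eb8c"  -- jmp 109299
  "ebe9"  -- jmp 10bb51
  "f20f58c3"  -- addsd xmm0,xmm3
  "f20f5e1d6fda0100"  -- divsd xmm3,QWORD PTR [rip+0x1da6f]
  "f30f1054240c"  -- movss xmm2,DWORD PTR [rsp+0xc]
  "f30f107b04"  -- movss xmm7,DWORD PTR [rbx+0x4]
  "f30f11542410"  -- movss DWORD PTR [rsp+0x10],xmm2
  "f30f117c240c"  -- movss DWORD PTR [rsp+0xc],xmm7
  "f30f58e9"  -- addss xmm5,xmm1
  "f30f5ac0"  -- cvtss2sd xmm0,xmm0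
  "f3410f1044241c"  -- movss xmm0,DWORD PTR [r12+0x1c]
  "f3420f5904a580061200"  -- mulss xmm0,DWORD PTR [r12*4+0x120680]
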